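-- pv_equiv track=rewrite | github.com/prapalu/esw | src/resource/.ipynb_checkpoints/conversion-checkpoint.py | get_query_narrative
-- ===== SOURCE A (Python) =====
-- def get_query_narrative(lines, variable):
--     ind = 0
--     while ind < len(lines) and variable not in lines[ind]:
--         ind+=1
--     narr = ""
--     # iterate over rows before the query
--     for i in range(ind):
--         if lines[i].strip().startswith("#"):
--             narr+="\n"+lines[i].strip().replace("#","").strip()
--     return narr.strip()
-- ===== SOURCE B (Python) =====
-- def get_query_narrative(lines, variable):
--     parts = []
--     for line in lines:
--         if variable in line:
--             break
--         s = line.strip()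
--         if s.startswith("#"):
--             parts.append(s.replace("#", "").strip())
--     return "\n".join(parts).strip()
-- ===== Notes on version B (the rewrite author's own statement) =====
-- stated objective: simpler
-- what changed: B replaces A's two-phase structure (scan for the query line's index, then re-scan lines[:ind] indexing by position while concatenating onto a string) with one early-breaking pass over the lines that collects the stripped comment parts in a list and returns '\n'.join(parts).strip().
import Mathlib
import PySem

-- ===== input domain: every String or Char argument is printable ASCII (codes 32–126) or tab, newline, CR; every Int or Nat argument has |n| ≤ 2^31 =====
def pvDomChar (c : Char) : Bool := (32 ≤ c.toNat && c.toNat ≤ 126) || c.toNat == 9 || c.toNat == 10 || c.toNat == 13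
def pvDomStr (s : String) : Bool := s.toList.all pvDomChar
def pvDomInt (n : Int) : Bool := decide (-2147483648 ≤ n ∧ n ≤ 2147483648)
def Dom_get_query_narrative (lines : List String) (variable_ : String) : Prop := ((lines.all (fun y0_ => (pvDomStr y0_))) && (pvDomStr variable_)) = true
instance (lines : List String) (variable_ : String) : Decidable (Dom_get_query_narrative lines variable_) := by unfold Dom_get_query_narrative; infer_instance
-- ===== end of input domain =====

-- B replaces A's find-index-then-rescan-prefix structure by one early-breaking pass that
-- collects the comment parts in a list and joins them (objective: simpler).

-- ===== PORT A =====
-- while ind < len(lines) and variable not in lines[ind]: ind += 1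
def gqnA_find (variable_ : String) : List String → Nat
  | [] => 0
  | h :: t => if PySem.Str.isIn variable_ h then 0 else gqnA_find variable_ t + 1

def get_query_narrative (lines : List String) (variable_ : String) : String :=
  let ind : Nat := gqnA_find variable_ lines
  -- for i in range(ind): if lines[i].strip().startswith("#"): narr += "\n" + lines[i].strip().replace("#","").strip()
  let narr : List Char :=
    (PySem.List.pyRange 0 (ind : Int) 1).foldl
      (fun narr i =>
        let li := (PySem.List.pyGetD lines i "").toList
        if PySem.Chars.startswith (PySem.Chars.strip li) ['#'] then
          narr ++ '\n' :: PySem.Chars.strip (PySem.Chars.replace (PySem.Chars.strip li) ['#'] [])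
        else narr) []
  String.ofList (PySem.Chars.strip narr)

-- ===== PORT B =====
-- single pass: break on the query line, collect stripped comment parts
def gqnB_parts (variable_ : String) : List String → List (List Char)
  | [] => []
  | h :: t =>
    if PySem.Str.isIn variable_ h then []
    else
      let s := PySem.Chars.strip h.toList
      if PySem.Chars.startswith s ['#'] then
        PySem.Chars.strip (PySem.Chars.replace s ['#'] []) :: gqnB_parts variable_ t
      else gqnB_parts variable_ t

def get_query_narrative_alt (lines : List String) (variable_ : String) : String :=
  String.ofList (PySem.Chars.strip (PySem.Chars.join ['\n'] (gqnB_parts variable_ lines)))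

-- ===== PRECONDITION & SPEC =====
def Spec_get_query_narrative (lines : List String) (variable_ : String) (out : String) : Prop := out = get_query_narrative_alt lines variable_
instance (lines : List String) (variable_ : String) (out : String) : Decidable (Spec_get_query_narrative lines variable_ out) := by unfold Spec_get_query_narrative; infer_instance

-- ===== CLAIM (what is proved, stated in full; the proofs are below) =====
def Claim_equal_get_query_narrative : Prop := ∀ (lines : List String) (variable_ : String), Dom_get_query_narrative lines variable_ → Spec_get_query_narrative lines variable_ (get_query_narrative lines variable_)

-- ===== LEMMAS AND PROOFS =====

-- the body of A's for-loop, as a function of the accumulator and the line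
def gqnA_step (acc : List Char) (li : List Char) : List Char :=
  if PySem.Chars.startswith (PySem.Chars.strip li) ['#'] then
    acc ++ '\n' :: PySem.Chars.strip (PySem.Chars.replace (PySem.Chars.strip li) ['#'] [])
  else acc

lemma gqnA_find_le (v : String) (xs : List String) : gqnA_find v xs ≤ xs.length := by
  induction xs with
  | nil => simp [gqnA_find]
  | cons h t ih =>
    simp only [gqnA_find, List.length_cons]
    split <;> omega

-- Step 1: A's index loop over range(ind) equals a foldl over the prefix of lines
lemma fold_range_eq (xs : List String) (n : Nat) (hn : n ≤ xs.length)
    (f : List Char → List Char → List Char) (init : List Char) :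
    (PySem.List.pyRange 0 (n : Int) 1).foldl
      (fun acc i => f acc ((PySem.List.pyGetD xs i "").toList)) init
    = (xs.take n).foldl (fun acc li => f acc li.toList) init := by
  have hlen : (xs.take n).length = n := by
    rw [List.length_take]; omega
  have hcast : ((n : Int)) = (((xs.take n).length : Nat) : Int) := by rw [hlen]
  rw [hcast, PySem.List.foldl_congr_mem _ _
      (fun acc j => f acc ((PySem.List.pyGetD (xs.take n) j "").toList)) init ?_,
    PySem.List.foldl_pyRange_pyGetD' (xs.take n) "" (fun acc li => f acc li.toList) init le_rfl,
    Int.toNat_zero, List.drop_zero]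
  intro acc j hj
  rw [PySem.List.mem_pyRange_one] at hj
  rw [hlen] at hj
  have e1 : PySem.List.pyGetD xs j "" = xs[j.toNat]'(by omega) :=
    PySem.List.pyGetD_eq_getElem xs "" hj.1 (by omega)
  have e2 : PySem.List.pyGetD (xs.take n) j "" = (xs.take n)[j.toNat]'(by rw [hlen]; omega) :=
    PySem.List.pyGetD_eq_getElem (xs.take n) "" hj.1 (by rw [hlen]; omega)
  simp only [e1, e2, List.getElem_take]

-- Step 2: the prefix fold builds exactly "\n"-prefixed parts of B
lemma fold_parts (v : String) (xs : List String) (acc : List Char) :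
    (xs.take (gqnA_find v xs)).foldl (fun a li => gqnA_step a li.toList) acc
    = acc ++ (gqnB_parts v xs).flatMap (fun p => '\n' :: p) := by
  induction xs generalizing acc with
  | nil => simp [gqnA_find, gqnB_parts]
  | cons h t ih =>
    by_cases hc : PySem.Chars.isIn v.toList h.toList = true
    · simp [gqnA_find, gqnB_parts, hc]
    · have hfind : gqnA_find v (h :: t) = gqnA_find v t + 1 := by
        simp [gqnA_find, hc]
      have hparts : gqnB_parts v (h :: t)
          = (if PySem.Chars.startswith (PySem.Chars.strip h.toList) ['#'] = true then
              PySem.Chars.strip (PySem.Chars.replace (PySem.Chars.strip h.toList) ['#'] []) :: gqnB_parts v t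
            else gqnB_parts v t) := by
        simp [gqnB_parts, hc]
      rw [hfind, hparts, List.take_succ_cons, List.foldl_cons]
      by_cases hs : PySem.Chars.startswith (PySem.Chars.strip h.toList) ['#'] = true
      · have hstep : gqnA_step acc h.toList
            = acc ++ '\n' :: PySem.Chars.strip (PySem.Chars.replace (PySem.Chars.strip h.toList) ['#'] []) := by
          simp [gqnA_step, hs]
        rw [hstep, ih, hs, if_pos rfl]
        simp [List.flatMap_cons, List.append_assoc]
      · have hstep : gqnA_step acc h.toList = acc := by simp [gqnA_step, hs]
        rw [hstep, ih, if_neg hs]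

-- Step 3: stripping the flatMap equals stripping the join
lemma strip_newline_cons (s : List Char) :
    PySem.Chars.strip ('\n' :: s) = PySem.Chars.strip s := by
  have hsp : PySem.Chars.isspace '\n' = true := by decide
  simp [PySem.Chars.strip, PySem.Chars.lstrip, hsp]

lemma flatMap_newline_eq_cons_join (ps : List (List Char)) (p : List Char) :
    (p :: ps).flatMap (fun q => '\n' :: q) = '\n' :: PySem.Chars.join ['\n'] (p :: ps) := by
  induction ps generalizing p with
  | nil => simp [PySem.Chars.join_singleton]
  | cons q rest ih =>
    rw [PySem.Chars.join_cons_cons, List.flatMap_cons, ih q]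
    simp [List.append_assoc]

lemma strip_flatMap_eq_strip_join (ps : List (List Char)) :
    PySem.Chars.strip (ps.flatMap (fun p => '\n' :: p))
    = PySem.Chars.strip (PySem.Chars.join ['\n'] ps) := by
  cases ps with
  | nil => simp [PySem.Chars.join_nil]
  | cons p rest => rw [flatMap_newline_eq_cons_join rest p, strip_newline_cons]

-- ===== VERDICT (by name: the statement is the Claim_ definition above) =====
theorem get_query_narrative_spec : Claim_equal_get_query_narrative := by
  intro lines v _
  show get_query_narrative lines v = get_query_narrative_alt lines v
  simp only [get_query_narrative, get_query_narrative_alt]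
  have h1 := fold_range_eq lines (gqnA_find v lines) (gqnA_find_le v lines) gqnA_step []
  simp only [gqnA_step] at h1
  have h2 := fold_parts v lines []
  simp only [gqnA_step] at h2
  rw [h1, h2, List.nil_append, strip_flatMap_eq_strip_join]
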